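-- pv_equiv track=rewrite | github.com/Nattanun16/Lab | lab8/naive_graph.py | naive_search_rl_via_rev
-- ===== SOURCE A (Python) =====
-- def naive_search_rl_via_rev(pat, text):
--     pat_rev = pat[::-1]
--     m = len(pat)
--     n = len(text)
--     res_a = []
--     for s in range(0, n - m + 1):
--         ok = True
--         for j in range(m):
--             if text[s + j] != pat_rev[j]:
--                 ok = False
--                 break
--         if ok:
--             res_a.append(s + 1)
--     return [a + m - 1 for a in res_a]
-- ===== SOURCE B (Python) =====
-- def naive_search_rl_via_rev(pat, text):
--     # Rabin-Karp rolling-hash scan for the reversed pattern; each hash hit is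
--     # verified by a direct slice comparison, so the result is exact.
--     if not pat:
--         return list(range(len(text) + 1))
--     pat_rev = pat[::-1]
--     m = len(pat)
--     n = len(text)
--     if m > n:
--         return []
--     MOD = (1 << 61) - 1
--     BASE = 131
--     hp = 0
--     hw = 0
--     for j in range(m):
--         hp = (hp * BASE + ord(pat_rev[j])) % MOD
--         hw = (hw * BASE + ord(text[j])) % MOD
--     powm = pow(BASE, m - 1, MOD)
--     res = []
--     for s in range(n - m + 1):
--         if s > 0:
--             hw = ((hw - ord(text[s - 1]) * powm) * BASE + ord(text[s + m - 1])) % MOD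
--         if hw == hp and text[s:s + m] == pat_rev:
--             res.append(s + m)
--     return res
-- ===== Notes on version B (the rewrite author's own statement) =====
-- stated objective: alternative
-- what changed: Replaced the position-by-position character comparison with a Rabin-Karp rolling-hash scan over the text (each hash hit verified by one slice comparison, so the result is exact), plus early returns for the empty pattern and for patterns longer than the text; it trades A's early-break char loop for per-position hash arithmetic, which is not measurably faster in Python on short patterns.
import Mathlib
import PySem

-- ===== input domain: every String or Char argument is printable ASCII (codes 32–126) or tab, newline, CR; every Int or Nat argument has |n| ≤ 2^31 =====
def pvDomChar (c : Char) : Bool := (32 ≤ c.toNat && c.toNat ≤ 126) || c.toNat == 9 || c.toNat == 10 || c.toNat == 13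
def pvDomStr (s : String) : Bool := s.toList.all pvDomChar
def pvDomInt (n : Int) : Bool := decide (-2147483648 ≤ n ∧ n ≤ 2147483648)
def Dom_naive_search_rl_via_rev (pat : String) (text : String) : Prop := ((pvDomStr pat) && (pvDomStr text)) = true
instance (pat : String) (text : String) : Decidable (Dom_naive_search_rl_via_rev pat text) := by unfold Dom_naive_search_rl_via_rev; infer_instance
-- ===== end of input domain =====

-- B replaces A's position-by-position character scan by a Rabin-Karp rolling-hash scan
-- (every hash hit is verified by a slice comparison, so the result is exact); same return value.


-- ===== PORT A =====
-- the inner 'for j in range(m)' with its break, as structural recursion over the index list;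
-- every index reached is in range, so the Option-level comparison is exact
def pvAOk (tl pr : List Char) (s : Int) : List Int → Bool
  | [] => true
  | j :: js =>
    if PySem.List.pyGet? tl (s + j) ≠ PySem.List.pyGet? pr j then false
    else pvAOk tl pr s js

def naive_search_rl_via_rev (pat : String) (text : String) : List Int :=
  let pat_rev : List Char := ((PySem.Str.slice? pat none none (-1)).getD "").toList
  let m : Int := PySem.Str.len pat
  let n : Int := PySem.Str.len text
  let res_a : List Int := (PySem.List.pyRange 0 (n - m + 1) 1).foldl
    (fun acc s =>
      if pvAOk text.toList pat_rev s (PySem.List.pyRange 0 m 1) then acc ++ [s + 1] else acc) []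
  res_a.map (fun a => a + m - 1)

-- ===== PORT B =====
-- ord(l[i]); every use below is at an in-range index
def pvOrd (l : List Char) (i : Int) : Int :=
  (((PySem.List.pyGet? l i).getD ' ').toNat : Int)

def naive_search_rl_via_rev_alt (pat : String) (text : String) : List Int :=
  if pat.toList = [] then PySem.List.pyRange 0 (PySem.Str.len text + 1) 1
  else
    let pat_rev : List Char := ((PySem.Str.slice? pat none none (-1)).getD "").toList
    let m : Int := PySem.Str.len pat
    let n : Int := PySem.Str.len text
    if m > n then []
    else
      let MOD : Int := 2 ^ 61 - 1
      let BASE : Int := 131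
      let h0 : Int × Int := (PySem.List.pyRange 0 m 1).foldl
        (fun h j => (PySem.Int.mod (h.1 * BASE + pvOrd pat_rev j) MOD,
                     PySem.Int.mod (h.2 * BASE + pvOrd text.toList j) MOD)) (0, 0)
      let powm : Int := PySem.Int.powMod BASE (m - 1).toNat MOD
      let st : Int × List Int := (PySem.List.pyRange 0 (n - m + 1) 1).foldl
        (fun st s =>
          let hw : Int :=
            if s > 0 then
              PySem.Int.mod ((st.1 - pvOrd text.toList (s - 1) * powm) * BASE
                + pvOrd text.toList (s + m - 1)) MOD
            else st.1
          if hw = h0.1 ∧ PySem.List.slice text.toList (some s) (some (s + m)) = pat_rev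
          then (hw, st.2 ++ [s + m]) else (hw, st.2)) (h0.2, [])
      st.2

-- ===== PRECONDITION & SPEC =====
def Spec_naive_search_rl_via_rev (pat : String) (text : String) (out : List Int) : Prop := out = naive_search_rl_via_rev_alt pat text
instance (pat : String) (text : String) (out : List Int) : Decidable (Spec_naive_search_rl_via_rev pat text out) := by unfold Spec_naive_search_rl_via_rev; infer_instance

-- ===== CLAIM (what is proved, stated in full; the proofs are below) =====
def Claim_equal_naive_search_rl_via_rev : Prop := ∀ (pat : String) (text : String), Dom_naive_search_rl_via_rev pat text → Spec_naive_search_rl_via_rev pat text (naive_search_rl_via_rev pat text)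

-- ===== LEMMAS AND PROOFS =====

-- the modulus, the plain polynomial hash, and the length-mN window at position s
def pvM : Int := 2 ^ 61 - 1
def pvH (w : List Char) : Int := w.foldl (fun a c => a * 131 + (c.toNat : Int)) 0
def pvWin (tl : List Char) (mN s : Nat) : List Char := (tl.drop s).take mN

theorem pvM_pos : 0 < pvM := by norm_num [pvM]

theorem pvmod_eq (x : Int) : PySem.Int.mod x (2 ^ 61 - 1) = x % pvM :=
  PySem.Int.mod_eq_emod_of_pos pvM_pos

theorem pvpow_eq (k : Nat) : PySem.Int.powMod 131 k (2 ^ 61 - 1) = 131 ^ k % pvM := by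
  unfold PySem.Int.powMod
  exact pvmod_eq _

theorem pvOrd_eq (l : List Char) (k : Nat) (hk : k < l.length) :
    pvOrd l (k : Int) = (l[k].toNat : Int) := by
  simp [pvOrd, PySem.List.pyGet?_natCast, List.getElem?_eq_getElem hk]

theorem pvH_foldl (w : List Char) : ∀ a : Int,
    w.foldl (fun a c => a * 131 + (c.toNat : Int)) a = a * 131 ^ w.length + pvH w := by
  induction w with
  | nil => intro a; simp [pvH]
  | cons c w ih =>
    intro a
    simp only [List.foldl_cons, List.length_cons, pvH] at *
    rw [ih, ih (0 * 131 + (c.toNat : Int))]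
    ring

theorem pvH_cons (c : Char) (w : List Char) :
    pvH (c :: w) = (c.toNat : Int) * 131 ^ w.length + pvH w := by
  have := pvH_foldl w (0 * 131 + (c.toNat : Int))
  simp only [pvH, List.foldl_cons] at *
  rw [this]; ring

theorem pvH_snoc (w : List Char) (c : Char) :
    pvH (w ++ [c]) = pvH w * 131 + (c.toNat : Int) := by
  simp [pvH]

-- the mod-at-each-step fold equals the plain fold reduced mod pvM
theorem pvHm_eq (w : List Char) : ∀ (a b : Int), a = b % pvM →
    w.foldl (fun a c => (a * 131 + (c.toNat : Int)) % pvM) a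
      = (w.foldl (fun a c => a * 131 + (c.toNat : Int)) b) % pvM := by
  induction w with
  | nil => intro a b h; simpa using h
  | cons c w ih =>
    intro a b h
    simp only [List.foldl_cons]
    apply ih
    subst h
    have hb : (b % pvM) ≡ b [ZMOD pvM] := Int.emod_emod_of_dvd b dvd_rfl
    exact (hb.mul_right 131).add_right _

-- one rolling-hash step is exact mod pvM
theorem pv_roll (w : List Char) (c d : Char) :
    ((pvH (c :: w) % pvM - (c.toNat : Int) * (131 ^ w.length % pvM)) * 131 + (d.toNat : Int)) % pvM
      = pvH (w ++ [d]) % pvM := by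
  have h1 : ∀ x : Int, x % pvM ≡ x [ZMOD pvM] := fun x => Int.emod_emod_of_dvd x dvd_rfl
  have h2 : (pvH (c :: w) % pvM - (c.toNat : Int) * (131 ^ w.length % pvM)) * 131 + (d.toNat : Int)
      ≡ (pvH (c :: w) - (c.toNat : Int) * 131 ^ w.length) * 131 + (d.toNat : Int) [ZMOD pvM] :=
    (((h1 _).sub ((Int.ModEq.refl _).mul (h1 _))).mul_right _).add_right _
  have h3 : (pvH (c :: w) - (c.toNat : Int) * 131 ^ w.length) * 131 + (d.toNat : Int)
      = pvH (w ++ [d]) := by rw [pvH_cons, pvH_snoc]; ring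
  exact h2.trans (h3 ▸ Int.ModEq.refl _)

theorem pvWin_cons (tl : List Char) (mN s : Nat) (hs : 1 ≤ s) (hm : 1 ≤ mN)
    (h : s + mN ≤ tl.length) :
    pvWin tl mN (s - 1) = tl[s - 1]'(by omega) :: (tl.drop s).take (mN - 1) := by
  obtain ⟨m', rfl⟩ : ∃ m', mN = m' + 1 := ⟨mN - 1, by omega⟩
  unfold pvWin
  rw [List.drop_eq_getElem_cons (by omega : s - 1 < tl.length), List.take_succ_cons,
    show s - 1 + 1 = s by omega]
  simp

theorem pvWin_snoc (tl : List Char) (mN s : Nat) (hm : 1 ≤ mN) (h : s + mN ≤ tl.length) :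
    pvWin tl mN s = (tl.drop s).take (mN - 1) ++ [tl[s + mN - 1]'(by omega)] := by
  obtain ⟨m', rfl⟩ : ∃ m', mN = m' + 1 := ⟨mN - 1, by omega⟩
  unfold pvWin
  rw [List.take_add_one, List.getElem?_drop, List.getElem?_eq_getElem (by omega)]
  simp only [Option.toList_some, Nat.add_sub_cancel]
  have : s + (m' + 1) - 1 = s + m' := by omega
  congr 1

-- the initial hash loop computes both hashes of the first windows
theorem pv_pairfold (aL bL : List Char) (hab : aL.length ≤ bL.length) :
    ∀ (cnt : Nat) (j x y : Int), 0 ≤ j → cnt = ((aL.length : Int) - j).toNat →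
    (PySem.List.pyRange j (aL.length : Int) 1).foldl
      (fun h i => ((h.1 * 131 + pvOrd aL i) % pvM, (h.2 * 131 + pvOrd bL i) % pvM)) (x, y)
    = ((aL.drop j.toNat).foldl (fun a c => (a * 131 + (c.toNat : Int)) % pvM) x,
       ((bL.take aL.length).drop j.toNat).foldl (fun a c => (a * 131 + (c.toNat : Int)) % pvM) y) := by
  intro cnt
  induction cnt with
  | zero =>
    intro j x y hj hcnt
    rw [PySem.List.pyRange_one_eq_nil (by omega)]
    rw [List.drop_of_length_le (by omega), List.drop_of_length_le (by simp; omega)]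
    simp
  | succ k ih =>
    intro j x y hj hcnt
    have hjlt : j < (aL.length : Int) := by omega
    rw [PySem.List.pyRange_one_cons hjlt]
    have hjn : j = ((j.toNat : Nat) : Int) := by omega
    have hja : j.toNat < aL.length := by omega
    have hjb : j.toNat < bL.length := by omega
    simp only [List.foldl_cons]
    rw [hjn, pvOrd_eq aL j.toNat hja, pvOrd_eq bL j.toNat hjb]
    simp only [Int.toNat_natCast]
    conv_rhs => rw [List.drop_eq_getElem_cons hja,
      List.drop_eq_getElem_cons (show j.toNat < (bL.take aL.length).length by simp; omega)]
    simp only [List.foldl_cons, List.getElem_take]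
    rw [show ((j.toNat : Nat) : Int) + 1 = (((j.toNat + 1 : Nat)) : Int) by push_cast; ring]
    rw [ih ((j.toNat + 1 : Nat) : Int) _ _ (by positivity) (by omega)]
    simp only [Int.toNat_natCast]

-- the main loop of B appends s+m exactly at the window matches
theorem pv_bfold (tl pr : List Char) (mN : Nat) (_hpr : pr.length = mN) (hm : 1 ≤ mN)
    (hn : mN ≤ tl.length) (hp powm : Int)
    (hhp : hp = pvH pr % pvM) (hpow : powm = 131 ^ (mN - 1) % pvM) :
    ∀ (cnt : Nat) (a h : Int) (acc : List Int), 0 ≤ a →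
      cnt = ((tl.length : Int) - (mN : Int) + 1 - a).toNat →
      h = pvH (pvWin tl mN (a - 1).toNat) % pvM →
      ((PySem.List.pyRange a ((tl.length : Int) - (mN : Int) + 1) 1).foldl
        (fun st s =>
          let hw : Int :=
            if s > 0 then
              ((st.1 - pvOrd tl (s - 1) * powm) * 131 + pvOrd tl (s + (mN : Int) - 1)) % pvM
            else st.1
          if hw = hp ∧ PySem.List.slice tl (some s) (some (s + (mN : Int))) = pr
          then (hw, st.2 ++ [s + (mN : Int)]) else (hw, st.2)) (h, acc)).2
      = acc ++ ((PySem.List.pyRange a ((tl.length : Int) - (mN : Int) + 1) 1).filter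
          (fun s => decide (pvWin tl mN s.toNat = pr))).map (fun s => s + (mN : Int)) := by
  intro cnt
  induction cnt with
  | zero =>
    intro a h acc ha hcnt hh
    rw [PySem.List.pyRange_one_eq_nil (by omega)]
    simp
  | succ k ih =>
    intro a h acc ha hcnt hh
    have halt : a < (tl.length : Int) - (mN : Int) + 1 := by omega
    have hbound : a.toNat + mN ≤ tl.length := by omega
    rw [PySem.List.pyRange_one_cons halt]
    simp only [List.foldl_cons, List.filter_cons]
    -- the rolled hash equals the hash of the current window
    have hhw : (if a > 0 then
          ((h - pvOrd tl (a - 1) * powm) * 131 + pvOrd tl (a + (mN : Int) - 1)) % pvM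
        else h) = pvH (pvWin tl mN a.toNat) % pvM := by
      by_cases ha0 : a > 0
      · rw [if_pos ha0]
        have h1 : 1 ≤ a.toNat := by omega
        have hb1 : a.toNat - 1 < tl.length := by omega
        have hb2 : a.toNat + mN - 1 < tl.length := by omega
        have e1 : a - 1 = ((a.toNat - 1 : Nat) : Int) := by omega
        have e2 : a + (mN : Int) - 1 = ((a.toNat + mN - 1 : Nat) : Int) := by omega
        rw [e1, pvOrd_eq tl _ hb1, e2, pvOrd_eq tl _ hb2]
        have ew : (a - 1).toNat = a.toNat - 1 := by omega
        rw [hh, ew]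
        have hwlen : ((tl.drop a.toNat).take (mN - 1)).length = mN - 1 := by
          simp; omega
        rw [pvWin_cons tl mN a.toNat h1 hm hbound]
        rw [pvWin_snoc tl mN a.toNat hm hbound]
        have := pv_roll ((tl.drop a.toNat).take (mN - 1)) (tl[a.toNat - 1]'hb1)
          (tl[a.toNat + mN - 1]'hb2)
        rw [hwlen] at this
        rw [hpow]
        exact this
      · rw [if_neg ha0]
        have : a = 0 := by omega
        subst this
        simpa using hh
    -- the slice by Int bounds is the window
    have hslice : PySem.List.slice tl (some a) (some (a + (mN : Int))) = pvWin tl mN a.toNat := by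
      rw [PySem.List.slice_toNat tl ha (by omega)]
      have : (a + (mN : Int)).toNat - a.toNat = mN := by omega
      rw [this]
      rfl
    simp only [hhw, hslice]
    by_cases hc : pvWin tl mN a.toNat = pr
    · rw [if_pos ⟨by rw [hhp, hc], hc⟩]
      rw [ih (a + 1) _ (acc ++ [a + (mN : Int)]) (by omega) (by omega)
        (by rw [show (a + 1 - 1).toNat = a.toNat by omega])]
      simp [hc]
    · have hcc : ¬ ((pvH (pvWin tl mN a.toNat) % pvM = hp) ∧ pvWin tl mN a.toNat = pr) := by
        intro hcon; exact hc hcon.2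
      rw [if_neg hcc]
      rw [ih (a + 1) _ acc (by omega) (by omega)
        (by rw [show (a + 1 - 1).toNat = a.toNat by omega])]
      simp [hc]

-- A's inner loop, from index j on, checks the remaining window suffix
theorem pv_aok (tl pr : List Char) : ∀ (cnt : Nat) (j s : Nat),
    s + pr.length ≤ tl.length → j ≤ pr.length → cnt = pr.length - j →
    (pvAOk tl pr (s : Int) (PySem.List.pyRange (j : Int) (pr.length : Int) 1) = true
      ↔ (tl.drop (s + j)).take (pr.length - j) = pr.drop j) := by
  intro cnt
  induction cnt with
  | zero =>
    intro j s hs hj hcnt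
    have hje : j = pr.length := by omega
    subst hje
    rw [PySem.List.pyRange_one_eq_nil (by omega)]
    simp [pvAOk, List.drop_length]
  | succ k ih =>
    intro j s hs hj hcnt
    have hjlt : j < pr.length := by omega
    have hsj : s + j < tl.length := by omega
    rw [PySem.List.pyRange_one_cons (by exact_mod_cast hjlt)]
    show (if PySem.List.pyGet? tl ((s : Int) + (j : Int)) ≠ PySem.List.pyGet? pr (j : Int)
        then false else pvAOk tl pr (s : Int) (PySem.List.pyRange ((j : Int) + 1) (pr.length : Int) 1)) = true ↔ _
    have e1 : (s : Int) + (j : Int) = ((s + j : Nat) : Int) := by push_cast; ring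
    have e2 : (j : Int) + 1 = ((j + 1 : Nat) : Int) := by push_cast; ring
    rw [e1, e2, PySem.List.pyGet?_natCast, PySem.List.pyGet?_natCast,
        List.getElem?_eq_getElem hsj, List.getElem?_eq_getElem hjlt]
    rw [List.drop_eq_getElem_cons hsj, List.drop_eq_getElem_cons hjlt,
        show pr.length - j = (pr.length - (j + 1)) + 1 by omega, List.take_succ_cons]
    by_cases hc : tl[s + j] = pr[j]
    · rw [if_neg (by simp [hc])]
      rw [show s + j + 1 = s + (j + 1) by omega]
      rw [ih (j + 1) s hs (by omega) (by omega)]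
      constructor
      · intro h2; rw [h2, hc]
      · intro h2
        injection h2
    · rw [if_pos (by simp [hc])]
      simp only [Bool.false_eq_true, false_iff]
      intro h2
      injection h2 with h3 h4
      exact hc h3

-- bridge: A's inner loop as the window condition, at an Int position
theorem pv_aok_cond (tl pr : List Char) (s : Int) (hs : 0 ≤ s)
    (hb : s.toNat + pr.length ≤ tl.length) :
    pvAOk tl pr s (PySem.List.pyRange 0 (pr.length : Int) 1)
      = decide (pvWin tl pr.length s.toNat = pr) := by
  have e0 : (0 : Int) = ((0 : Nat) : Int) := rfl
  have es : s = ((s.toNat : Nat) : Int) := by omega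
  rw [es, e0]
  simp only [Int.toNat_natCast]
  have h := pv_aok tl pr (pr.length - 0) 0 s.toNat hb (by omega) rfl
  simp only [Nat.add_zero, Nat.sub_zero, List.drop_zero] at h
  by_cases hc : pvWin tl pr.length s.toNat = pr
  · rw [h.mpr hc]
    simp [hc]
  · have hA := Bool.eq_false_iff.mpr (fun hcon => hc (h.mp hcon))
    rw [hA]
    simp [hc]

-- A's port equals the filtered-window form
theorem pv_a_eq (pat text : String) :
    naive_search_rl_via_rev pat text
      = ((PySem.List.pyRange 0 ((text.toList.length : Int) - (pat.toList.length : Int) + 1) 1).filter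
          (fun s => decide (pvWin text.toList pat.toList.length s.toNat = pat.toList.reverse))).map
          (fun s => s + (pat.toList.length : Int)) := by
  unfold naive_search_rl_via_rev
  simp only [PySem.Str.slice?_none_none_neg_one, Option.getD_some, String.toList_ofList,
    PySem.Str.len_eq]
  rw [PySem.List.foldl_append_if
    (fun s => pvAOk text.toList pat.toList.reverse s
      (PySem.List.pyRange 0 (pat.toList.length : Int) 1)) (fun s => s + 1) _ []]
  simp only [List.nil_append]
  rw [List.map_map]
  have hfun : ((fun a => a + (pat.toList.length : Int) - 1) ∘ (fun s => s + 1))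
      = (fun s : Int => s + (pat.toList.length : Int)) := by
    funext s; simp; ring
  rw [hfun]
  congr 1
  apply List.filter_congr
  intro s hsmem
  rw [PySem.List.mem_pyRange_one] at hsmem
  have hs0 : (0 : Int) ≤ s := hsmem.1
  have hsn : s.toNat + pat.toList.reverse.length ≤ text.toList.length := by
    have h2 := hsmem.2
    rw [List.length_reverse]
    omega
  have h := pv_aok_cond text.toList pat.toList.reverse s hs0 hsn
  rw [List.length_reverse] at h
  exact h

-- B's port equals the same filtered-window form (nonempty pattern that fits)
theorem pv_b_eq (pat text : String) (h1 : pat.toList ≠ [])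
    (h2 : pat.toList.length ≤ text.toList.length) :
    naive_search_rl_via_rev_alt pat text
      = ((PySem.List.pyRange 0 ((text.toList.length : Int) - (pat.toList.length : Int) + 1) 1).filter
          (fun s => decide (pvWin text.toList pat.toList.length s.toNat = pat.toList.reverse))).map
          (fun s => s + (pat.toList.length : Int)) := by
  unfold naive_search_rl_via_rev_alt
  rw [if_neg h1]
  simp only [PySem.Str.slice?_none_none_neg_one, Option.getD_some, String.toList_ofList,
    PySem.Str.len_eq]
  rw [if_neg (by
    simp only [not_lt]
    exact_mod_cast h2)]
  simp only [pvmod_eq, pvpow_eq]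
  have hpf := pv_pairfold pat.toList.reverse text.toList (by simpa using h2)
    ((pat.toList.reverse.length : Int) - 0).toNat 0 0 0 le_rfl rfl
  rw [List.length_reverse] at hpf
  simp only [Int.toNat_zero, List.drop_zero] at hpf
  rw [hpf]
  have hm1 : 1 ≤ pat.toList.length := by
    cases hp : pat.toList with
    | nil => exact absurd hp h1
    | cons c l => simp

  have hbf := pv_bfold text.toList pat.toList.reverse pat.toList.length
    (by simp) hm1 h2
    (List.foldl (fun a c => (a * 131 + (c.toNat : Int)) % pvM) 0 pat.toList.reverse)
    (131 ^ ((pat.toList.length : Int) - 1).toNat % pvM)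
    (pvHm_eq pat.toList.reverse 0 0 (by simp))
    (by rw [show ((pat.toList.length : Int) - 1).toNat = pat.toList.length - 1 by omega])
    ((text.toList.length : Int) - (pat.toList.length : Int) + 1 - 0).toNat 0
    (List.foldl (fun a c => (a * 131 + (c.toNat : Int)) % pvM) 0
      (text.toList.take pat.toList.length))
    [] le_rfl rfl
    (by
      rw [pvHm_eq (text.toList.take pat.toList.length) 0 0 (by simp)]
      simp only [pvWin, pvH]
      rfl)
  rw [hbf]
  simp

-- ===== VERDICT (by name: the statement is the Claim_ definition above) =====
theorem naive_search_rl_via_rev_spec : Claim_equal_naive_search_rl_via_rev := by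
  intro pat text _
  unfold Spec_naive_search_rl_via_rev
  by_cases hemp : pat.toList = []
  · rw [pv_a_eq]
    unfold naive_search_rl_via_rev_alt
    rw [if_pos hemp]
    simp [hemp, pvWin, PySem.Str.len_eq]
  · by_cases hlen : pat.toList.length ≤ text.toList.length
    · rw [pv_a_eq, pv_b_eq pat text hemp hlen]
    · rw [pv_a_eq]
      rw [PySem.List.pyRange_one_eq_nil (by
        have : text.toList.length < pat.toList.length := not_le.mp hlen
        omega)]
      unfold naive_search_rl_via_rev_alt
      rw [if_neg hemp]
      simp only [PySem.Str.len_eq]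
      rw [if_pos (by
        have : text.toList.length < pat.toList.length := not_le.mp hlen
        exact_mod_cast this)]
      simp
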